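-- pv_equiv track=rewrite | github.com/bbookng/Programmers | kakao/주사위 고르기.py | solution
-- ===== SOURCE A (Python) =====
-- from itertools import combinations, product
--
-- def binary_search_win(left, right, target, arr):
--     while left <= right:
--         mid = (left + right) // 2
--
--         if arr[mid] < target:
--             left = mid + 1
--         else:
--             right = mid - 1
--
--     return left
--
-- def binary_search_lose(left, right, target, arr):
--     while left <= right:
--         mid = (left + right) // 2
--
--         if arr[mid] <= target:
--             left = mid + 1
--         else:
--             right = mid - 1
--
--     return right + 1
--
-- def solution(dice):
--     answer = []
--     max_value = 0
--
--     # 1. 주사위 n/2 개씩 가져 가기 조합 만들기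
--     combi = list(combinations(range(len(dice)), len(dice) // 2))
--
--     # 2. 가져간 주사위 6^n 합 만들기
--     for i in range(len(combi) // 2 + 1):
--         a = combi[i]
--         b = combi[-i-1]
--
--         sum_a = sorted(list(map(sum, product(*list(dice[j] for j in a)))))
--         sum_b = sorted(list(map(sum, product(*list(dice[j] for j in b)))))
--
--         a_win_count = 0
--         b_win_count = 0
--
--         for k in sum_a:
--             a_win_count += binary_search_win(0, len(sum_b) - 1, k, sum_b)
--             b_win_count += len(sum_b) - binary_search_lose(0, len(sum_b) - 1, k, sum_b)
--
--         if a_win_count > max_value: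
--             max_value = a_win_count
--             answer = a
--         if b_win_count > max_value:
--             max_value = b_win_count
--             answer = b
--
--     # 3. 이분탐색. (A를 기준으로 B를 돌면서 찾는다.)
--
--
--     return list(map(lambda x:x + 1, list(answer)))
-- ===== SOURCE B (Python) =====
-- from itertools import combinations, product
--
-- def solution(dice):
--     answer = []
--     max_value = 0
--     combi = list(combinations(range(len(dice)), len(dice) // 2))
--     for i in range(len(combi) // 2 + 1):
--         a = combi[i]
--         b = combi[-i-1]
--         sum_a = [sum(p) for p in product(*(dice[j] for j in a))]
--         sum_b = [sum(p) for p in product(*(dice[j] for j in b))]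
--         a_win_count = 0
--         b_win_count = 0
--         for va in sum_a:
--             for vb in sum_b:
--                 if va > vb:
--                     a_win_count += 1
--                 elif vb > va:
--                     b_win_count += 1
--         if a_win_count > max_value:
--             max_value = a_win_count
--             answer = a
--         if b_win_count > max_value:
--             max_value = b_win_count
--             answer = b
--     return [x + 1 for x in answer]
-- ===== Notes on version B (the rewrite author's own statement) =====
-- stated objective: simpler
-- what changed: The sort of both half-sum lists and the two hand-written binary-search helpers are removed: wins are counted by a direct nested loop with strict comparisons over the unsorted half-sum lists; the outer partition loop, tie-breaking and +1 mapping are unchanged.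
import Mathlib
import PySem

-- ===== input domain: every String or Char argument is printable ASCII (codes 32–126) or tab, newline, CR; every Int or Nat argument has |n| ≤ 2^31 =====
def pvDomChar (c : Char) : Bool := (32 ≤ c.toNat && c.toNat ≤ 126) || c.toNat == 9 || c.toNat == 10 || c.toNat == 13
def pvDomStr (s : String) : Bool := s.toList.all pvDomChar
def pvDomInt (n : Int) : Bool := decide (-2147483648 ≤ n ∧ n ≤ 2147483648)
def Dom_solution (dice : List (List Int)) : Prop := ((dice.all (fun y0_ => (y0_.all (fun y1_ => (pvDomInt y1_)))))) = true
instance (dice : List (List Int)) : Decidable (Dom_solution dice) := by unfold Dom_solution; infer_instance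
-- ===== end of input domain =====

-- B replaces A's sort + hand-written binary searches by a direct nested strict-comparison
-- count over the unsorted half-sum lists (objective: simpler; same results, no speed claim).

-- shared helpers: both Pythons select dice[j] for j in the combination and build
-- itertools.product(*selected) (tuples in product order), then sum each tuple
def diceSel (dice : List (List Int)) (idxs : List Int) : List (List Int) :=
  idxs.map (fun j => PySem.List.pyGetD dice j [])

def pyProduct (ls : List (List Int)) : List (List Int) :=
  ls.foldl (fun acc l => acc.flatMap (fun t => l.map (fun x => t ++ [x]))) [[]]

def sums (dice : List (List Int)) (idxs : List Int) : List Int :=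
  (pyProduct (diceSel dice idxs)).map List.sum

-- combi = list(combinations(range(len(dice)), len(dice) // 2)), used by both Pythons
def combiOf (dice : List (List Int)) : List (List Int) :=
  PySem.List.combinations (PySem.List.pyRange 0 (dice.length : Int) 1) (dice.length / 2)

-- ===== PORT A =====
-- binary_search_win: while-loop as recursion on the interval width
def binarySearchWin (left right : Int) (target : Int) (arr : List Int) : Int :=
  if h : left ≤ right then
    if PySem.List.pyGetD arr (PySem.Int.floordiv (left + right) 2) 0 < target then
      binarySearchWin (PySem.Int.floordiv (left + right) 2 + 1) right target arr
    else
      binarySearchWin left (PySem.Int.floordiv (left + right) 2 - 1) target arr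
  else left
termination_by (right + 1 - left).toNat
decreasing_by
  · have hb := PySem.Int.floordiv_two_mid_bounds h; omega
  · have hb := PySem.Int.floordiv_two_mid_bounds h; omega

def binarySearchLose (left right : Int) (target : Int) (arr : List Int) : Int :=
  if h : left ≤ right then
    if PySem.List.pyGetD arr (PySem.Int.floordiv (left + right) 2) 0 ≤ target then
      binarySearchLose (PySem.Int.floordiv (left + right) 2 + 1) right target arr
    else
      binarySearchLose left (PySem.Int.floordiv (left + right) 2 - 1) target arr
  else right + 1
termination_by (right + 1 - left).toNat
decreasing_by
  · have hb := PySem.Int.floordiv_two_mid_bounds h; omega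
  · have hb := PySem.Int.floordiv_two_mid_bounds h; omega

-- one iteration of A's loop, state = (answer, max_value)
def stepA (dice : List (List Int)) (combi : List (List Int)) (st : List Int × Int) (i : Int) :
    List Int × Int :=
  let a := PySem.List.pyGetD combi i []
  let b := PySem.List.pyGetD combi (-i - 1) []
  let sum_a := PySem.List.sorted (sums dice a) (fun x => x) false
  let sum_b := PySem.List.sorted (sums dice b) (fun x => x) false
  let counts := sum_a.foldl (fun (c : Int × Int) k =>
      (c.1 + binarySearchWin 0 ((sum_b.length : Int) - 1) k sum_b,
       c.2 + ((sum_b.length : Int) - binarySearchLose 0 ((sum_b.length : Int) - 1) k sum_b))) (0, 0)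
  let st1 := if counts.1 > st.2 then (a, counts.1) else st
  if counts.2 > st1.2 then (b, counts.2) else st1

def solution (dice : List (List Int)) : List Int :=
  (((PySem.List.pyRange 0 (PySem.Int.floordiv ((combiOf dice).length : Int) 2 + 1) 1).foldl
      (stepA dice (combiOf dice)) ([], 0)).1).map (fun x => x + 1)

-- ===== PORT B =====
-- one iteration of B's loop: unsorted sums, nested strict-comparison counting
def stepB (dice : List (List Int)) (combi : List (List Int)) (st : List Int × Int) (i : Int) :
    List Int × Int :=
  let a := PySem.List.pyGetD combi i []
  let b := PySem.List.pyGetD combi (-i - 1) []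
  let sum_a := sums dice a
  let sum_b := sums dice b
  let counts := sum_a.foldl (fun (c : Int × Int) va =>
      sum_b.foldl (fun (c : Int × Int) vb =>
        if va > vb then (c.1 + 1, c.2) else if vb > va then (c.1, c.2 + 1) else c) c) (0, 0)
  let st1 := if counts.1 > st.2 then (a, counts.1) else st
  if counts.2 > st1.2 then (b, counts.2) else st1

def solution_alt (dice : List (List Int)) : List Int :=
  (((PySem.List.pyRange 0 (PySem.Int.floordiv ((combiOf dice).length : Int) 2 + 1) 1).foldl
      (stepB dice (combiOf dice)) ([], 0)).1).map (fun x => x + 1)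

-- ===== PRECONDITION & SPEC =====
def Spec_solution (dice : List (List Int)) (out : List Int) : Prop := out = solution_alt dice
instance (dice : List (List Int)) (out : List Int) : Decidable (Spec_solution dice out) := by unfold Spec_solution; infer_instance

-- ===== CLAIM (what is proved, stated in full; the proofs are below) =====
def Claim_equal_solution : Prop := ∀ (dice : List (List Int)), Dom_solution dice → Spec_solution dice (solution dice)

-- ===== LEMMAS AND PROOFS =====

-- in a list whose first n positions satisfy p and the rest do not, countP p = n
lemma countP_eq_of_prefix (arr : List Int) (p : Int → Bool) (n : Nat) (hn : n ≤ arr.length)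
    (h1 : ∀ (j : Nat) (hj : j < arr.length), j < n → p arr[j])
    (h2 : ∀ (j : Nat) (hj : j < arr.length), n ≤ j → ¬ p arr[j]) :
    arr.countP p = n := by
  have hsplit : arr.countP p = (arr.take n).countP p + (arr.drop n).countP p := by
    conv_lhs => rw [← arr.take_append_drop n]
    rw [List.countP_append]
  have ht : (arr.take n).countP p = n := by
    rw [List.countP_eq_length.2, List.length_take]
    · omega
    · intro a ha
      rw [List.mem_iff_getElem] at ha
      obtain ⟨i, hi, rfl⟩ := ha
      have hi' : i < n := by simp [List.length_take] at hi; omega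
      rw [List.getElem_take]
      exact h1 i (by simp [List.length_take] at hi; omega) hi'
  have hd : (arr.drop n).countP p = 0 := by
    rw [List.countP_eq_zero]
    intro a ha
    rw [List.mem_iff_getElem] at ha
    obtain ⟨i, hi, rfl⟩ := ha
    have hi' : n + i < arr.length := by simp [List.length_drop] at hi; omega
    rw [List.getElem_drop]
    exact h2 (n + i) hi' (by omega)
  omega

-- dual: first n positions fail p, the rest satisfy it
lemma countP_eq_of_suffix (arr : List Int) (p : Int → Bool) (n : Nat) (hn : n ≤ arr.length)
    (h1 : ∀ (j : Nat) (hj : j < arr.length), j < n → ¬ p arr[j])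
    (h2 : ∀ (j : Nat) (hj : j < arr.length), n ≤ j → p arr[j]) :
    arr.countP p = arr.length - n := by
  have hsplit : arr.countP p = (arr.take n).countP p + (arr.drop n).countP p := by
    conv_lhs => rw [← arr.take_append_drop n]
    rw [List.countP_append]
  have ht : (arr.take n).countP p = 0 := by
    rw [List.countP_eq_zero]
    intro a ha
    rw [List.mem_iff_getElem] at ha
    obtain ⟨i, hi, rfl⟩ := ha
    have hi' : i < n := by simp [List.length_take] at hi; omega
    rw [List.getElem_take]
    exact h1 i (by simp [List.length_take] at hi; omega) hi'
  have hd : (arr.drop n).countP p = (arr.drop n).length := by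
    rw [List.countP_eq_length]
    intro a ha
    rw [List.mem_iff_getElem] at ha
    obtain ⟨i, hi, rfl⟩ := ha
    have hi' : n + i < arr.length := by simp [List.length_drop] at hi; omega
    rw [List.getElem_drop]
    exact h2 (n + i) hi' (by omega)
  rw [hsplit, ht, hd, List.length_drop]
  omega

-- A's binary_search_win returns n whenever the interval brackets n and the array
-- is < target strictly below position n and ≥ target from n on
lemma binarySearchWin_eq (arr : List Int) (t : Int) (n : Nat)
    (h1 : ∀ (j : Nat) (hj : j < arr.length), j < n → arr[j] < t)
    (h2 : ∀ (j : Nat) (hj : j < arr.length), n ≤ j → t ≤ arr[j]) :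
    ∀ (fuel : Nat) (left right : Int), (right + 1 - left).toNat ≤ fuel →
      0 ≤ left → right < (arr.length : Int) → left ≤ (n : Int) → (n : Int) ≤ right + 1 →
      binarySearchWin left right t arr = n := by
  intro fuel
  induction fuel with
  | zero =>
    intro left right hf h0 hrl hl hr
    rw [binarySearchWin, dif_neg (by omega)]
    omega
  | succ m ih =>
    intro left right hf h0 hrl hl hr
    rw [binarySearchWin]
    by_cases h : left ≤ right
    · rw [dif_pos h]
      have hmid := PySem.Int.floordiv_two_mid_bounds h
      set mid := PySem.Int.floordiv (left + right) 2 with hmiddef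
      have hmn : mid.toNat < arr.length := by omega
      have hget : PySem.List.pyGetD arr mid 0 = arr[mid.toNat] := by
        rw [PySem.List.pyGetD_of_nonneg arr 0 (by omega), List.getD_eq_getElem?_getD,
          List.getElem?_eq_getElem hmn]
        rfl
      rw [hget]
      by_cases hc : arr[mid.toNat] < t
      · rw [if_pos hc]
        have hlt : mid.toNat < n := by
          by_contra hcon
          exact absurd (h2 mid.toNat hmn (by omega)) (by omega)
        exact ih (mid + 1) right (by omega) (by omega) hrl (by omega) hr
      · rw [if_neg hc]
        have hge : n ≤ mid.toNat := by
          by_contra hcon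
          exact absurd (h1 mid.toNat hmn (by omega)) hc
        exact ih left (mid - 1) (by omega) h0 (by omega) hl (by omega)
    · rw [dif_neg h]
      omega

lemma binarySearchLose_eq (arr : List Int) (t : Int) (n : Nat)
    (h1 : ∀ (j : Nat) (hj : j < arr.length), j < n → arr[j] ≤ t)
    (h2 : ∀ (j : Nat) (hj : j < arr.length), n ≤ j → t < arr[j]) :
    ∀ (fuel : Nat) (left right : Int), (right + 1 - left).toNat ≤ fuel →
      0 ≤ left → right < (arr.length : Int) → left ≤ (n : Int) → (n : Int) ≤ right + 1 →
      binarySearchLose left right t arr = n := by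
  intro fuel
  induction fuel with
  | zero =>
    intro left right hf h0 hrl hl hr
    rw [binarySearchLose, dif_neg (by omega)]
    omega
  | succ m ih =>
    intro left right hf h0 hrl hl hr
    rw [binarySearchLose]
    by_cases h : left ≤ right
    · rw [dif_pos h]
      have hmid := PySem.Int.floordiv_two_mid_bounds h
      set mid := PySem.Int.floordiv (left + right) 2 with hmiddef
      have hmn : mid.toNat < arr.length := by omega
      have hget : PySem.List.pyGetD arr mid 0 = arr[mid.toNat] := by
        rw [PySem.List.pyGetD_of_nonneg arr 0 (by omega), List.getD_eq_getElem?_getD,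
          List.getElem?_eq_getElem hmn]
        rfl
      rw [hget]
      by_cases hc : arr[mid.toNat] ≤ t
      · rw [if_pos hc]
        have hlt : mid.toNat < n := by
          by_contra hcon
          exact absurd (h2 mid.toNat hmn (by omega)) (by omega)
        exact ih (mid + 1) right (by omega) (by omega) hrl (by omega) hr
      · rw [if_neg hc]
        have hge : n ≤ mid.toNat := by
          by_contra hcon
          exact absurd (h1 mid.toNat hmn (by omega)) hc
        exact ih left (mid - 1) (by omega) h0 (by omega) hl (by omega)
    · rw [dif_neg h]
      omega

-- on the sorted list, A's search counts the strictly smaller elements of the raw list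
lemma binarySearchWin_countP (sb : List Int) (k : Int) :
    binarySearchWin 0 (((PySem.List.sorted sb (fun x => x) false).length : Int) - 1) k
        (PySem.List.sorted sb (fun x => x) false)
      = (sb.countP (fun v => decide (v < k)) : Int) := by
  set sbS := PySem.List.sorted sb (fun x => x) false with hS
  have hs : sbS.Pairwise (· ≤ ·) := PySem.List.sorted_pairwise sb (fun x => x)
  obtain ⟨hbl, h1, h2⟩ := PySem.List.bisectLeft_spec sbS k hs
  set n := PySem.List.bisectLeft sbS k with hn
  have he := binarySearchWin_eq sbS k n h1 h2 (((sbS.length : Int) - 1 + 1 - 0).toNat)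
    0 ((sbS.length : Int) - 1) (by omega) (by omega) (by omega) (by omega) (by omega)
  rw [he]
  have hcnt : sbS.countP (fun v => decide (v < k)) = n := by
    apply countP_eq_of_prefix sbS _ n hbl
    · intro j hj hjn
      exact decide_eq_true (h1 j hj hjn)
    · intro j hj hjn
      simpa using not_lt.2 (h2 j hj hjn)
  rw [← (PySem.List.sorted_perm sb (fun x => x) false).countP_eq, hcnt]

-- on the sorted list, len - binary_search_lose counts the strictly larger elements
lemma binarySearchLose_countP (sb : List Int) (k : Int) :
    ((PySem.List.sorted sb (fun x => x) false).length : Int)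
      - binarySearchLose 0 (((PySem.List.sorted sb (fun x => x) false).length : Int) - 1) k
          (PySem.List.sorted sb (fun x => x) false)
      = (sb.countP (fun v => decide (k < v)) : Int) := by
  set sbS := PySem.List.sorted sb (fun x => x) false with hS
  have hs : sbS.Pairwise (· ≤ ·) := PySem.List.sorted_pairwise sb (fun x => x)
  obtain ⟨hbr, h1, h2⟩ := PySem.List.bisectRight_spec sbS k hs
  set n := PySem.List.bisectRight sbS k with hn
  have he := binarySearchLose_eq sbS k n h1 h2 (((sbS.length : Int) - 1 + 1 - 0).toNat)
    0 ((sbS.length : Int) - 1) (by omega) (by omega) (by omega) (by omega) (by omega)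
  rw [he]
  have hcnt : sbS.countP (fun v => decide (k < v)) = sbS.length - n := by
    apply countP_eq_of_suffix sbS _ n hbr
    · intro j hj hjn
      simpa using not_lt.2 (h1 j hj hjn)
    · intro j hj hjn
      exact decide_eq_true (h2 j hj hjn)
  rw [← (PySem.List.sorted_perm sb (fun x => x) false).countP_eq, hcnt]
  omega

-- B's inner loop counts strictly smaller / strictly larger elements of sb
lemma innerCount (va : Int) (sb : List Int) (c : Int × Int) :
    sb.foldl (fun (c : Int × Int) vb =>
        if va > vb then (c.1 + 1, c.2) else if vb > va then (c.1, c.2 + 1) else c) c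
      = (c.1 + (sb.countP (fun v => decide (v < va)) : Int),
         c.2 + (sb.countP (fun v => decide (va < v)) : Int)) := by
  induction sb generalizing c with
  | nil => simp
  | cons x xs ih =>
    simp only [List.foldl_cons, List.countP_cons]
    rw [ih]
    rcases lt_trichotomy x va with h | h | h
    · simp [h, not_lt.2 h.le, Prod.ext_iff]
      omega
    · simp [h]
    · simp [not_lt.2 h.le, h, Prod.ext_iff]
      omega

-- the two per-iteration counting loops compute the same (a_win, b_win) pair
lemma counts_eq (sa sb : List Int) :
    (PySem.List.sorted sa (fun x => x) false).foldl (fun (c : Int × Int) k =>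
        (c.1 + binarySearchWin 0 (((PySem.List.sorted sb (fun x => x) false).length : Int) - 1) k
            (PySem.List.sorted sb (fun x => x) false),
         c.2 + (((PySem.List.sorted sb (fun x => x) false).length : Int)
            - binarySearchLose 0 (((PySem.List.sorted sb (fun x => x) false).length : Int) - 1) k
                (PySem.List.sorted sb (fun x => x) false)))) (0, 0)
      = sa.foldl (fun (c : Int × Int) va =>
          sb.foldl (fun (c : Int × Int) vb =>
            if va > vb then (c.1 + 1, c.2) else if vb > va then (c.1, c.2 + 1) else c) c) (0, 0) := by
  have hR : (fun (c : Int × Int) va =>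
      sb.foldl (fun (c : Int × Int) vb =>
        if va > vb then (c.1 + 1, c.2) else if vb > va then (c.1, c.2 + 1) else c) c)
      = fun (c : Int × Int) va =>
        (c.1 + (sb.countP (fun v => decide (v < va)) : Int),
         c.2 + (sb.countP (fun v => decide (va < v)) : Int)) :=
    funext fun c => funext fun va => innerCount va sb c
  rw [hR]
  simp only [binarySearchWin_countP, binarySearchLose_countP]
  rw [PySem.List.foldl_prod_mk (f := fun a k => a + (sb.countP (fun v => decide (v < k)) : Int))
        (g := fun a k => a + (sb.countP (fun v => decide (k < v)) : Int)),
      PySem.List.foldl_prod_mk (f := fun a k => a + (sb.countP (fun v => decide (v < k)) : Int))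
        (g := fun a k => a + (sb.countP (fun v => decide (k < v)) : Int)),
      PySem.List.foldl_add, PySem.List.foldl_add, PySem.List.foldl_add, PySem.List.foldl_add]
  have hp := PySem.List.sorted_perm sa (fun x => x) false
  rw [(hp.map (fun k => (sb.countP (fun v => decide (v < k)) : Int))).sum_eq,
      (hp.map (fun k => (sb.countP (fun v => decide (k < v)) : Int))).sum_eq]

lemma step_eq (dice combi : List (List Int)) (st : List Int × Int) (i : Int) :
    stepA dice combi st i = stepB dice combi st i := by
  simp only [stepA, stepB]
  rw [counts_eq (sums dice (PySem.List.pyGetD combi i []))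
        (sums dice (PySem.List.pyGetD combi (-i - 1) []))]

-- ===== VERDICT (by name: the statement is the Claim_ definition above) =====
theorem solution_spec : Claim_equal_solution := by
  intro dice _
  unfold Spec_solution solution solution_alt
  rw [show stepA dice (combiOf dice) = stepB dice (combiOf dice) from
    funext fun st => funext fun i => step_eq dice (combiOf dice) st i]
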